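-- pv_equiv track=rewrite | github.com/SKantar/InterviewBit | 06_HeapsAndMaps/magician_and_chocolates.py | nchoc
-- ===== SOURCE A (Python) =====
-- class MaxHeap(int):
--     def __lt__(self, other):
--         return self > other
--
-- def nchoc(A, B):
--     from heapq import heappop, heappush
--     heap, ans = list(), 0
--
--     for b in B:
--         heappush(heap, MaxHeap(b))
--
--     for _ in range(A):
--         e = heappop(heap)
--         ans += e
--         heappush(heap, MaxHeap(e // 2))
--
--     return ans % 1000000007
-- ===== SOURCE B (Python) =====
-- def nchoc(A, B):
--     vals = list(B)
--     total = 0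
--     for _ in range(A):
--         m = max(vals)
--         total += m
--         vals[vals.index(m)] = m // 2
--     return total % 1000000007
-- ===== Notes on version B (the rewrite author's own statement) =====
-- stated objective: simpler
-- what changed: Replaces the binary heap (heappush/heappop with an inverted-comparison wrapper class) by a plain per-step linear scan: take max(vals), add it, and overwrite its first occurrence with its floor half.
import Mathlib
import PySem

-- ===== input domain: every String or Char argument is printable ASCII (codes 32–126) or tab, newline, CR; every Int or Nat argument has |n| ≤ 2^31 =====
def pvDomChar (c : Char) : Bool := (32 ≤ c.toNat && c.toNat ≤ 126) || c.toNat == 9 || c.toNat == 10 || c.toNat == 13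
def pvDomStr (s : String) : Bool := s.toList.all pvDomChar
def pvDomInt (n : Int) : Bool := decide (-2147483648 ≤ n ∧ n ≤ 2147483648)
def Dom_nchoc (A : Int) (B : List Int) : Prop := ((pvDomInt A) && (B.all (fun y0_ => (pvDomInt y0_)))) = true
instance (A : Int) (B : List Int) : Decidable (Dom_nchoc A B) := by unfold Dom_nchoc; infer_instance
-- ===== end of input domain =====

-- B replaces A's binary heap (heapq with an inverted-comparison int subclass) by a plain
-- per-step linear max-scan; equivalence of the RETURN values is proved (neither mutates B).

-- ===== PORT A =====
-- heapq._siftdown with MaxHeap order ('x < y' on MaxHeap means x > y on Int):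
-- bubble newitem up from pos toward startpos while its parent is smaller.
def siftdownAux (newitem : Int) (startpos : Nat) (pos : Nat) (heap : List Int) : List Int :=
  if _h : startpos < pos then
    let parentpos := (pos - 1) / 2
    let parent := heap.getD parentpos 0
    if parent < newitem then
      siftdownAux newitem startpos parentpos (heap.set pos parent)
    else
      heap.set pos newitem
  else
    heap.set pos newitem
termination_by pos
decreasing_by omega

-- heapq.heappush: append then sift down from the new leaf.
def heappush (heap : List Int) (item : Int) : List Int :=
  siftdownAux item 0 heap.length (heap ++ [item])

-- heapq._siftup with MaxHeap order: move the hole at pos down to a leaf along the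
-- larger child, then place newitem there and bubble it up with _siftdown.
def siftupAux (newitem : Int) (endpos : Nat) (startpos : Nat) (pos : Nat) (heap : List Int) : List Int :=
  let childpos := 2 * pos + 1
  if _h : childpos < endpos then
    let rightpos := childpos + 1
    let childpos' := if rightpos < endpos ∧ ¬ (heap.getD childpos 0 > heap.getD rightpos 0)
                     then rightpos else childpos
    siftupAux newitem endpos startpos childpos' (heap.set pos (heap.getD childpos' 0))
  else
    siftdownAux newitem startpos pos heap
termination_by endpos - pos
decreasing_by simp only [gt_iff_lt]; split <;> omega

-- heapq.heappop: pop the last element; if the heap is nonempty, return the root,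
-- move the last element to the root and sift up.  none = IndexError on an empty heap.
def heappop (heap : List Int) : Option (Int × List Int) :=
  match heap.getLast? with
  | none => none
  | some lastelt =>
    let rest := heap.dropLast
    if rest.isEmpty then
      some (lastelt, rest)
    else
      some (rest.getD 0 0, siftupAux lastelt rest.length 0 0 (rest.set 0 lastelt))

-- 'for _ in range(A): e = heappop(heap); ans += e; heappush(heap, e // 2)'
def nchocLoop (k : Nat) (heap : List Int) (ans : Int) : Option Int :=
  match k with
  | 0 => some ans
  | k + 1 =>
    match heappop heap with
    | none => none
    | some (e, h') => nchocLoop k (heappush h' (PySem.Int.floordiv e 2)) (ans + e)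

def nchoc (A : Int) (B : List Int) : Int :=
  let heap := B.foldl (fun h b => heappush h b) []
  match nchocLoop A.toNat heap 0 with
  | some ans => PySem.Int.mod ans 1000000007
  | none => 0   -- Python raises IndexError here; excluded by Pre_nchoc

-- ===== PORT B =====
-- one step of Source B's loop: m = max(vals); vals[vals.index(m)] = m // 2
def altStep (vals : List Int) : Option (Int × List Int) :=
  match PySem.List.max? vals (fun y => y) with
  | none => none   -- ValueError: max of empty list
  | some m =>
    match PySem.List.index? vals m with
    | none => none   -- unreachable: m ∈ vals
    | some i => some (m, vals.set i (PySem.Int.floordiv m 2))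

def nchocAltLoop (k : Nat) (vals : List Int) (total : Int) : Option Int :=
  match k with
  | 0 => some total
  | k + 1 =>
    match altStep vals with
    | none => none
    | some (m, vals') => nchocAltLoop k vals' (total + m)

def nchoc_alt (A : Int) (B : List Int) : Int :=
  match nchocAltLoop A.toNat B 0 with
  | some t => PySem.Int.mod t 1000000007
  | none => 0   -- Python raises ValueError here; excluded by Pre_nchoc

-- ===== PRECONDITION & SPEC =====
-- Python A raises IndexError (and B ValueError) when at least one pop is requested
-- from an empty list: exactly the inputs with A > 0 and B = [] are excluded.
def Pre_nchoc (A : Int) (B : List Int) : Prop := A ≤ 0 ∨ B ≠ []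
instance (A : Int) (B : List Int) : Decidable (Pre_nchoc A B) := by unfold Pre_nchoc; infer_instance
def pvWitness_nchoc : Int × List Int := (3, [5, 2, 8])

def Spec_nchoc (A : Int) (B : List Int) (out : Int) : Prop := out = nchoc_alt A B
instance (A : Int) (B : List Int) (out : Int) : Decidable (Spec_nchoc A B out) := by unfold Spec_nchoc; infer_instance

-- ===== CLAIM (what is proved, stated in full; the proofs are below) =====
def Claim_equal_nchoc : Prop := ∀ (A : Int) (B : List Int), Dom_nchoc A B → Pre_nchoc A B → Spec_nchoc A B (nchoc A B)

-- ===== LEMMAS AND PROOFS =====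

-- multiset-equality of two integer lists, phrased with counts
def SameCounts (h v : List Int) : Prop := ∀ a : Int, h.count a = v.count a

-- max-heap shape: every non-root element is ≤ its parent
def IsHeap (h : List Int) : Prop :=
  ∀ i : Nat, 0 < i → i < h.length → h.getD i 0 ≤ h.getD ((i - 1) / 2) 0

theorem nchoc_count_set (l : List Int) (i : Nat) (hi : i < l.length) (b a : Int) :
    (l.set i b).count a
      = l.count a + (if b = a then 1 else 0) - (if l.getD i 0 = a then 1 else 0) := by
  have hsplit : l = l.take i ++ l[i] :: l.drop (i + 1) := by
    rw [List.getElem_cons_drop hi, List.take_append_drop]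
  have hc : List.count a l = List.count a (l.take i ++ l[i] :: l.drop (i + 1)) := by
    rw [← hsplit]
  rw [List.getD_eq_getElem l 0 hi, List.set_eq_take_append_cons_drop, if_pos hi, hc]
  simp only [List.count_append, List.count_cons]
  by_cases h1 : b = a <;> by_cases h2 : l[i] = a <;> simp [h1, h2] <;> omega

theorem count_ge_of_getD (l : List Int) (p : Nat) (hp : p < l.length) (a : Int)
    (he : l.getD p 0 = a) : 1 ≤ l.count a := by
  rw [List.getD_eq_getElem l 0 hp] at he
  exact List.count_pos_iff.2 (he ▸ l.getElem_mem hp)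

theorem nchoc_sd_length (x : Int) (s p : Nat) (h : List Int) :
    (siftdownAux x s p h).length = h.length := by
  fun_induction siftdownAux with
  | case1 ih => simp_all
  | case2 => simp
  | case3 => simp

theorem getD_set_ne (l : List Int) (i j : Nat) (b : Int) (hne : j ≠ i) :
    (l.set i b).getD j 0 = l.getD j 0 := by
  simp [List.getD_eq_getElem?_getD, List.getElem?_set_ne hne.symm]

theorem getD_set_eq (l : List Int) (i : Nat) (hi : i < l.length) (b : Int) :
    (l.set i b).getD i 0 = b := by
  simp [List.getD_eq_getElem?_getD, hi]

theorem count_set_set (h : List Int) (p q : Nat) (hp : p < h.length) (hq : q < h.length)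
    (hne : q ≠ p) (x a : Int) :
    ((h.set p (h.getD q 0)).set q x).count a = ((h.set p x).count a) := by
  have hq' : q < (h.set p (h.getD q 0)).length := by simp [List.length_set]; omega
  rw [nchoc_count_set _ _ hq', getD_set_ne _ _ _ _ hne,
      nchoc_count_set h p hp (h.getD q 0), nchoc_count_set h p hp x]
  have f1 := count_ge_of_getD h p hp a
  have f2 := count_ge_of_getD h q hq a
  split_ifs <;> omega

theorem nchoc_sd_count (x : Int) (p : Nat) (h : List Int) (hp : p < h.length) (a : Int) :
    (siftdownAux x 0 p h).count a = ((h.set p x).count a) := by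
  revert hp
  fun_induction siftdownAux with
  | case1 pos heap h1 pp par h2 ih =>
    intro hp
    have hpp : pp < heap.length := by omega
    have hpplen : pp < (heap.set pos par).length := by simp [List.length_set]; omega
    rw [ih hpplen]
    exact count_set_set heap pos pp hp hpp (by omega) x a
  | case2 => intro _; rfl
  | case3 => intro _; rfl

theorem nchoc_su_length (x : Int) (n s p : Nat) (h : List Int) :
    (siftupAux x n s p h).length = h.length := by
  fun_induction siftupAux with
  | case1 ih => simp_all
  | case2 => exact nchoc_sd_length ..

theorem nchoc_su_count (x : Int) (n p : Nat) (h : List Int) (hn : n = h.length)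
    (hp : p < h.length) (a : Int) :
    (siftupAux x n 0 p h).count a = ((h.set p x).count a) := by
  revert hn hp
  fun_induction siftupAux with
  | case1 pos heap cp hcp rp cp' ih =>
    intro hn hp
    have hcp' : cp' < heap.length := by
      have hcpv : cp = 2*pos+1 := rfl
      have : cp' = if rp < n ∧ ¬ (heap.getD cp 0 > heap.getD rp 0) then rp else cp := rfl
      have hrp : rp = cp + 1 := rfl
      split at this <;> omega
    have hlen : (heap.set pos (heap.getD cp' 0)).length = heap.length := by simp
    have hn1 : n = (heap.set pos (heap.getD cp' 0)).length := by rw [hlen]; exact hn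
    have hp1 : cp' < (heap.set pos (heap.getD cp' 0)).length := by rw [hlen]; exact hcp'
    rw [ih hn1 hp1]
    have hpos : pos < cp' := by
      have hcpv : cp = 2*pos+1 := rfl
      have : cp' = if rp < n ∧ ¬ (heap.getD cp 0 > heap.getD rp 0) then rp else cp := rfl
      have hrp : rp = cp + 1 := rfl
      split at this <;> omega
    exact count_set_set heap pos cp' hp hcp' (by omega) x a
  | case2 pos heap cp hcp =>
    intro hn hp
    exact nchoc_sd_count x pos heap hp a

theorem nchoc_sd_heap (x : Int) (p : Nat) (h : List Int) (hp : p < h.length)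
    (ha : ∀ i, 0 < i → i < h.length → i ≠ p → (i - 1) / 2 ≠ p →
          h.getD i 0 ≤ h.getD ((i - 1) / 2) 0)
    (hb : ∀ i, 0 < i → i < h.length → (i - 1) / 2 = p → h.getD i 0 ≤ x)
    (hd : ∀ i, 0 < i → i < h.length → (i - 1) / 2 = p → 0 < p →
          h.getD i 0 ≤ h.getD ((p - 1) / 2) 0) :
    IsHeap (siftdownAux x 0 p h) := by
  unfold IsHeap
  revert hp ha hb hd
  fun_induction siftdownAux with
  | case1 pos heap h1 pp par h2 ih =>
    intro hp ha hb hd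
    have hppv : pp = (pos - 1) / 2 := rfl
    have hpplt : pp < pos := by omega
    have hlen : (heap.set pos par).length = heap.length := by simp
    apply ih
    · omega
    · -- ha'
      intro i h0 hi hne1 hne2
      rw [hlen] at hi
      by_cases hip : i = pos
      · exact absurd (hip ▸ hppv.symm) hne2
      · rw [getD_set_ne _ _ _ _ hip]
        by_cases hpar : (i - 1) / 2 = pos
        · rw [hpar, getD_set_eq _ _ hp]
          have := hd i h0 hi hpar h1
          rw [← hppv] at this; exact this
        · rw [getD_set_ne _ _ _ _ hpar]
          exact ha i h0 hi hip hpar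
    · -- hb'
      intro i h0 hi hpi
      rw [hlen] at hi
      by_cases hip : i = pos
      · subst hip; rw [getD_set_eq _ _ hp]; exact le_of_lt h2
      · rw [getD_set_ne _ _ _ _ hip]
        have hnep : (i - 1) / 2 ≠ pos := by omega
        calc heap.getD i 0 ≤ heap.getD ((i-1)/2) 0 := ha i h0 hi hip hnep
          _ = par := by rw [hpi, hppv]
          _ ≤ x := le_of_lt h2
    · -- hd'
      intro i h0 hi hpi hpp0
      rw [hlen] at hi
      have hgpne : (pp - 1) / 2 ≠ pos := by omega
      rw [getD_set_ne _ _ _ _ hgpne]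
      have hppa : pp ≠ pos := by omega
      have hkey : heap.getD pp 0 ≤ heap.getD ((pp - 1) / 2) 0 :=
        ha pp hpp0 (by omega) hppa hgpne
      by_cases hip : i = pos
      · subst hip; rw [getD_set_eq _ _ hp]; exact hkey
      · rw [getD_set_ne _ _ _ _ hip]
        have hnep : (i - 1) / 2 ≠ pos := by omega
        calc heap.getD i 0 ≤ heap.getD ((i-1)/2) 0 := ha i h0 hi hip hnep
          _ = heap.getD pp 0 := by rw [hpi]
          _ ≤ _ := hkey
  | case2 pos heap h1 pp par h2 =>
    intro hp ha hb hd i h0 hi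
    rw [List.length_set] at hi
    by_cases hip : i = pos
    · subst hip
      have hne : (i - 1) / 2 ≠ i := by omega
      rw [getD_set_eq _ _ hp, getD_set_ne _ _ _ _ hne]
      exact not_lt.mp h2
    · rw [getD_set_ne _ _ _ _ hip]
      by_cases hpar : (i - 1) / 2 = pos
      · rw [hpar, getD_set_eq _ _ hp]
        exact hb i h0 hi hpar
      · rw [getD_set_ne _ _ _ _ hpar]
        exact ha i h0 hi hip hpar
  | case3 pos heap h1 =>
    intro hp ha hb hd i h0 hi
    rw [List.length_set] at hi
    by_cases hip : i = pos
    · omega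
    · rw [getD_set_ne _ _ _ _ hip]
      by_cases hpar : (i - 1) / 2 = pos
      · rw [hpar, getD_set_eq _ _ hp]
        exact hb i h0 hi hpar
      · rw [getD_set_ne _ _ _ _ hpar]
        exact ha i h0 hi hip hpar

theorem nchoc_root_max (h : List Int) (hh : IsHeap h) :
    ∀ i, i < h.length → h.getD i 0 ≤ h.getD 0 0 := by
  intro i
  induction i using Nat.strong_induction_on with
  | _ i ih =>
    intro hi
    rcases Nat.eq_zero_or_pos i with h0 | h0
    · subst h0; exact le_refl _
    · calc h.getD i 0 ≤ h.getD ((i-1)/2) 0 := hh i h0 hi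
        _ ≤ h.getD 0 0 := ih ((i-1)/2) (by omega) (by omega)

theorem nchoc_su_heap (x : Int) (n p : Nat) (h : List Int) (hn : n = h.length)
    (hp : p < h.length)
    (ha : ∀ i, 0 < i → i < h.length → i ≠ p → (i - 1) / 2 ≠ p →
          h.getD i 0 ≤ h.getD ((i - 1) / 2) 0)
    (hd : ∀ i, 0 < i → i < h.length → (i - 1) / 2 = p → 0 < p →
          h.getD i 0 ≤ h.getD ((p - 1) / 2) 0) :
    IsHeap (siftupAux x n 0 p h) := by
  revert hn hp ha hd
  fun_induction siftupAux with
  | case1 pos heap cp hcp rp cp' ih =>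
    intro hn hp ha hd
    have hcpv : cp = 2 * pos + 1 := rfl
    have hrpv : rp = cp + 1 := rfl
    have hcp'v : cp' = if rp < n ∧ ¬ (heap.getD cp 0 > heap.getD rp 0) then rp else cp := rfl
    have hcp'lt : cp' < n := by split at hcp'v <;> omega
    have hposlt : pos < cp' := by split at hcp'v <;> omega
    have hcp'par : (cp' - 1) / 2 = pos := by split at hcp'v <;> omega
    have hchoice : ∀ s, 0 < s → s < n → (s - 1) / 2 = pos → s ≠ cp' →
        heap.getD s 0 ≤ heap.getD cp' 0 := by
      intro s h0 hs hspar hsne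
      have hs2 : s = cp ∨ s = rp := by omega
      split at hcp'v
      · rename_i hcond
        rcases hs2 with rfl | rfl
        · rw [hcp'v]; exact not_lt.mp hcond.2
        · omega
      · rename_i hcond
        rcases hs2 with rfl | rfl
        · omega
        · push Not at hcond
          rw [hcp'v]
          have : rp < n := by omega
          exact le_of_lt (hcond this)
    have hlen : (heap.set pos (heap.getD cp' 0)).length = heap.length := by simp
    apply ih
    · rw [hlen]; exact hn
    · rw [hlen]; omega
    · -- ha'
      intro i h0 hi hne1 hne2
      rw [hlen, ← hn] at hi
      by_cases hip : i = pos
      · subst hip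
        have hparne : (i - 1) / 2 ≠ i := by omega
        have hparne2 : (i - 1) / 2 ≠ cp' := by omega
        rw [getD_set_eq _ _ hp, getD_set_ne _ _ _ _ hparne]
        exact hd cp' (by omega) (by omega) hcp'par h0
      · rw [getD_set_ne _ _ _ _ hip]
        by_cases hpar : (i - 1) / 2 = pos
        · rw [hpar, getD_set_eq _ _ hp]
          exact hchoice i h0 hi hpar hne1
        · rw [getD_set_ne _ _ _ _ hpar]
          exact ha i h0 (by omega) hip hpar
    · -- hd'
      intro i h0 hi hpi hcp'0
      rw [hlen, ← hn] at hi
      have hipos : i ≠ pos := by omega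
      rw [getD_set_ne _ _ _ _ hipos, hcp'par]
      rw [getD_set_eq _ _ hp]
      have hparne : (i - 1) / 2 ≠ pos := by omega
      have := ha i h0 (by omega) hipos hparne
      rw [hpi] at this
      exact this
  | case2 pos heap cp hcp =>
    intro hn hp ha hd
    have hcpv : cp = 2 * pos + 1 := rfl
    apply nchoc_sd_heap x pos heap hp ha
    · intro i h0 hi hpar; omega
    · intro i h0 hi hpar hp0; omega

theorem getD_append_left (l : List Int) (x : Int) (j : Nat) (hj : j < l.length) :
    (l ++ [x]).getD j 0 = l.getD j 0 := by
  rw [List.getD_eq_getElem _ _ (by simp; omega), List.getD_eq_getElem _ _ hj,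
      List.getElem_append_left hj]

theorem nchoc_push_count (h : List Int) (x a : Int) :
    (heappush h x).count a = (x :: h).count a := by
  unfold heappush
  have hp : h.length < (h ++ [x]).length := by simp
  rw [nchoc_sd_count x h.length (h ++ [x]) hp a, nchoc_count_set _ _ hp]
  have : (h ++ [x]).getD h.length 0 = x := by
    rw [List.getD_eq_getElem _ _ hp, List.getElem_append_right (by omega)]
    simp
  rw [this]
  simp [List.count_append, List.count_cons]

theorem nchoc_push_heap (h : List Int) (x : Int) (hh : IsHeap h) : IsHeap (heappush h x) := by
  unfold heappush
  have hp : h.length < (h ++ [x]).length := by simp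
  apply nchoc_sd_heap x h.length (h ++ [x]) hp
  · intro i h0 hi hne1 hne2
    simp only [List.length_append, List.length_cons, List.length_nil] at hi
    have hi' : i < h.length := by omega
    rw [getD_append_left _ _ _ hi', getD_append_left _ _ _ (by omega)]
    exact hh i h0 hi'
  · intro i h0 hi hpar
    simp only [List.length_append, List.length_cons, List.length_nil] at hi
    omega
  · intro i h0 hi hpar hp0
    simp only [List.length_append, List.length_cons, List.length_nil] at hi
    omega

theorem nchoc_pop_spec (h : List Int) (hh : IsHeap h) (hne : h ≠ []) :
    ∃ h', heappop h = some (h.getD 0 0, h') ∧ IsHeap h' ∧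
      (∀ a : Int, (h.getD 0 0 :: h').count a = h.count a) ∧
      h'.length + 1 = h.length := by
  have hsplit : h.dropLast ++ [h.getLast hne] = h := List.dropLast_append_getLast hne
  have hlast : h.getLast? = some (h.getLast hne) := List.getLast?_eq_some_getLast hne
  unfold heappop
  rw [hlast]
  by_cases hrest : h.dropLast.isEmpty
  · -- h is a singleton
    have h1 : h.dropLast = [] := List.isEmpty_iff.mp hrest
    obtain ⟨e, he⟩ : ∃ e, h = [e] := by
      cases h with
      | nil => exact absurd rfl hne
      | cons hd tl =>
        cases tl with
        | nil => exact ⟨hd, rfl⟩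
        | cons h2 t2 => simp [List.dropLast] at h1
    subst he
    refine ⟨[], by simp, ?_, ?_, ?_⟩
    · intro i h0 hi; simp at hi
    · intro a; rfl
    · rfl
  · simp only [Bool.not_eq_true] at hrest
    simp only [hrest, Bool.false_eq_true, if_false]
    set rest := h.dropLast with hrestdef
    set last := h.getLast hne with hlastdef
    have hrne : rest ≠ [] := by
      intro hc; rw [hc] at hrest; simp at hrest
    have hrlen : 0 < rest.length := List.length_pos_iff.mpr hrne
    have hrlen2 : rest.length + 1 = h.length := by
      rw [← hsplit]; simp
    have hget : ∀ j, j < rest.length → rest.getD j 0 = h.getD j 0 := by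
      intro j hj
      rw [← hsplit, getD_append_left _ _ _ hj]
    have hroot : rest.getD 0 0 = h.getD 0 0 := hget 0 hrlen
    have hsetlen : (rest.set 0 last).length = rest.length := by simp
    refine ⟨_, by rw [hroot], ?_, ?_, ?_⟩
    · -- IsHeap of the sifted result
      apply nchoc_su_heap last rest.length 0 (rest.set 0 last) (by simp) (by simp; omega)
      · intro i h0 hi hne1 hne2
        rw [hsetlen] at hi
        rw [getD_set_ne _ _ _ _ (by omega), getD_set_ne _ _ _ _ (by omega)]
        rw [hget i hi, hget ((i-1)/2) (by omega)]
        exact hh i h0 (by omega)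
      · intro i h0 hi hpar hp0; omega
    · -- counts
      intro a
      have hsu := nchoc_su_count last rest.length 0 (rest.set 0 last)
        (by simp) (by simp; omega) a
      rw [List.set_set] at hsu
      have hch : List.count a h = List.count a rest + (if last = a then 1 else 0) := by
        rw [← hsplit]
        rw [List.count_append, List.count_cons, List.count_nil]
        simp [beq_iff_eq]
      have f1 := count_ge_of_getD rest 0 hrlen a
      rw [List.count_cons, hsu, nchoc_count_set rest 0 hrlen last a, ← hroot, hch]
      simp only [beq_iff_eq]
      split_ifs with h1 h2 <;> omega
    · rw [nchoc_su_length, hsetlen]; omega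

theorem samecounts_mem (h v : List Int) (hc : SameCounts h v) (a : Int) :
    a ∈ h ↔ a ∈ v := by
  rw [← List.count_pos_iff, ← List.count_pos_iff, hc a]

theorem samecounts_nil (h v : List Int) (hc : SameCounts h v) (hv : v = []) : h = [] := by
  subst hv
  cases h with
  | nil => rfl
  | cons b t =>
    have := (samecounts_mem _ _ hc b).mp List.mem_cons_self
    simp at this

theorem getD_mem (h : List Int) (i : Nat) (hi : i < h.length) : h.getD i 0 ∈ h := by
  rw [List.getD_eq_getElem _ _ hi]; exact h.getElem_mem hi

theorem mem_le_root (h : List Int) (hh : IsHeap h) (a : Int) (ha : a ∈ h) :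
    a ≤ h.getD 0 0 := by
  obtain ⟨i, hi, hia⟩ := List.getElem_of_mem ha
  have := nchoc_root_max h hh i hi
  rwa [List.getD_eq_getElem _ _ hi, hia] at this

theorem nchoc_step_eq (h vals : List Int) (hh : IsHeap h) (hc : SameCounts h vals)
    (hv : vals ≠ []) :
    ∃ m h' i, heappop h = some (m, h') ∧
      PySem.List.max? vals (fun y => y) = some m ∧
      PySem.List.index? vals m = some i ∧ i < vals.length ∧
      IsHeap (heappush h' (PySem.Int.floordiv m 2)) ∧
      SameCounts (heappush h' (PySem.Int.floordiv m 2))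
                 (vals.set i (PySem.Int.floordiv m 2)) := by
  have hne : h ≠ [] := by
    intro hc0
    exact hv (samecounts_nil vals h (fun a => (hc a).symm) hc0)
  obtain ⟨h', hpop, hh', hcnt, hlen⟩ := nchoc_pop_spec h hh hne
  obtain ⟨m, hm⟩ : ∃ m, PySem.List.max? vals (fun y => y) = some m := by
    cases hmx : PySem.List.max? vals (fun y => y) with
    | none => exact absurd ((PySem.List.max?_eq_none_iff vals _).mp hmx) hv
    | some m => exact ⟨m, rfl⟩
  have hmmem : m ∈ vals := PySem.List.max?_mem hm
  have hmmax : ∀ y ∈ vals, y ≤ m := fun y hy => PySem.List.max?_isMax hm y hy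
  -- the heap root equals the maximum
  have hroot : h.getD 0 0 = m := by
    apply le_antisymm
    · exact hmmax _ ((samecounts_mem h vals hc _).mp (getD_mem h 0 (by
        cases h with | nil => exact absurd rfl hne | cons b t => simp)))
    · exact mem_le_root h hh m ((samecounts_mem h vals hc m).mpr hmmem)
  obtain ⟨i, hidx⟩ : ∃ i, PySem.List.index? vals m = some i := by
    cases hix : PySem.List.index? vals m with
    | none => exact absurd ((PySem.List.index?_eq_none_iff vals m).mp hix) (by simp only [not_not]; exact hmmem)
    | some i => exact ⟨i, rfl⟩
  obtain ⟨hilt, hvi, _⟩ := PySem.List.getElem_of_index?_eq_some hidx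
  refine ⟨m, h', i, by rw [← hroot]; exact hpop, hm, hidx, hilt, ?_, ?_⟩
  · exact nchoc_push_heap h' _ hh'
  · intro a
    rw [nchoc_push_count, nchoc_count_set vals i hilt]
    have h1 := hcnt a
    rw [hroot] at h1
    have h2 := hc a
    have hgd : vals.getD i 0 = m := by rw [List.getD_eq_getElem _ _ hilt, hvi]
    rw [hgd]
    have f1 : m = a → 1 ≤ vals.count a := by
      intro he; subst he; exact List.count_pos_iff.mpr hmmem
    rw [List.count_cons] at h1 ⊢
    simp only [beq_iff_eq] at *
    split_ifs at * <;> omega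

theorem nchoc_loop_eq (k : Nat) (h vals : List Int) (ans : Int)
    (hh : IsHeap h) (hc : SameCounts h vals) :
    nchocLoop k h ans = nchocAltLoop k vals ans := by
  induction k generalizing h vals ans with
  | zero => rfl
  | succ k ih =>
    by_cases hv : vals = []
    · have hhn : h = [] := samecounts_nil h vals hc hv
      subst hv hhn
      rfl
    · obtain ⟨m, h', i, hpop, hm, hidx, hilt, hh2, hc2⟩ := nchoc_step_eq h vals hh hc hv
      simp only [nchocLoop, nchocAltLoop, altStep, hpop, hm, hidx]
      exact ih _ _ _ hh2 hc2

theorem nchoc_heapify_gen (l : List Int) : ∀ (h : List Int), IsHeap h →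
    IsHeap (l.foldl (fun acc b => heappush acc b) h) ∧
    (∀ a, (l.foldl (fun acc b => heappush acc b) h).count a = h.count a + l.count a) := by
  induction l with
  | nil => intro h hh; exact ⟨hh, fun a => by simp⟩
  | cons b t ih =>
    intro h hh
    obtain ⟨ih1, ih2⟩ := ih (heappush h b) (nchoc_push_heap h b hh)
    refine ⟨ih1, fun a => ?_⟩
    rw [List.foldl_cons] at *
    rw [ih2 a, nchoc_push_count, List.count_cons, List.count_cons]
    simp only [beq_iff_eq]
    split_ifs <;> omega

theorem nchoc_heapify (B : List Int) :
    IsHeap (B.foldl (fun h b => heappush h b) []) ∧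
    SameCounts (B.foldl (fun h b => heappush h b) []) B := by
  obtain ⟨h1, h2⟩ := nchoc_heapify_gen B [] (by intro i h0 hi; simp at hi)
  exact ⟨h1, fun a => by rw [h2 a]; simp⟩

-- ===== VERDICT (by name: the statement is the Claim_ definition above) =====
theorem nchoc_spec : Claim_equal_nchoc := by
  intro A B _ _
  unfold Spec_nchoc nchoc nchoc_alt
  obtain ⟨hh, hc⟩ := nchoc_heapify B
  simp only []
  rw [nchoc_loop_eq A.toNat _ B 0 hh hc]
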